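-- pv_equiv track=rewrite | github.com/rumblereuploads-beep/numerology-bot | bot.py | reduce_number
-- ===== SOURCE A (Python) =====
-- MASTER_SET = {11, 22, 33}
--
-- def digit_sum(n: int) -> int:
--     return sum(int(c) for c in str(abs(n)))
--
-- def reduce_number(n: int) -> int:
--     """
--     Reduce to a single digit unless a master number (11, 22, 33) appears during reduction.
--     """
--     s = digit_sum(n)
--     if s in MASTER_SET:
--         return s
--     while s > 9:
--         s = digit_sum(s)
--         if s in MASTER_SET:
--             return s
--     return s
-- ===== SOURCE B (Python) =====
-- MASTER_SET = {11, 22, 33}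
--
-- def digit_sum(n: int) -> int:
--     return sum(int(c) for c in str(abs(n)))
--
-- def reduce_number(n: int) -> int:
--     """Recursive form of the reduction: one digit-sum step, then recurse."""
--     s = digit_sum(n)
--     if s in MASTER_SET:
--         return s
--     if s <= 9:
--         return s
--     return reduce_number(s)
-- ===== Notes on version B (the rewrite author's own statement) =====
-- stated objective: simpler
-- what changed: The explicit while-loop with an in-loop early return is replaced by direct recursion on the digit-sum recurrence (master check, single-digit base case, recursive call), keeping the exact check order.
import Mathlib
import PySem

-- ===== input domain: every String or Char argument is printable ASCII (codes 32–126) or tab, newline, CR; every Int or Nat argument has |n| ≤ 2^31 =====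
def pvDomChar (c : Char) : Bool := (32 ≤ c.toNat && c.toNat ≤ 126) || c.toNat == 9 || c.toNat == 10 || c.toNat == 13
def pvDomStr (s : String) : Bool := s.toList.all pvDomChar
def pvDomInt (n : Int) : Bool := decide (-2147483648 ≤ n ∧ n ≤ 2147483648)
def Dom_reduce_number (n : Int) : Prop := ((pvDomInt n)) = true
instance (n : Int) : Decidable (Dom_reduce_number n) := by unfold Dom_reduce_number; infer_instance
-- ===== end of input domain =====

-- B replaces A's while-loop (with in-loop early return) by direct recursion on the same
-- digit-sum recurrence, preserving the master-check-before-base-case order; objective: simpler.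


-- ===== PORT A =====
-- MASTER_SET = {11, 22, 33}
def MASTER_SET : PySem.Set Int := PySem.Set.ofList [11, 22, 33]

-- digit_sum(n) = sum(int(c) for c in str(abs(n)))  (shared helper of Source A and Source B).
-- int(c) is PySem.Int.ofChars? [c] with getD 0; str(abs n) contains only digit chars, so
-- ofChars? never returns none here and the port is exact.
def digit_sum (n : Int) : Int :=
  ((PySem.Int.toChars |n|).map (fun c => (PySem.Int.ofChars? [c]).getD 0)).sum

-- the while loop of A; fuel only makes the recursion structural (digit_sum strictly
-- decreases above 9, so the supplied fuel is never exhausted in reality)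
def reduce_loop (fuel : Nat) (s : Int) : Int :=
  if s > 9 then
    match fuel with
    | 0 => s
    | f + 1 =>
      let s' := digit_sum s
      if s' ∈ MASTER_SET then s' else reduce_loop f s'
  else s

def reduce_number (n : Int) : Int :=
  let s := digit_sum n
  if s ∈ MASTER_SET then s
  else reduce_loop ((digit_sum n).toNat + 1) s

-- ===== PORT B =====
-- recursion of Source B, with the same fuel guard for structural termination
def reduce_go (fuel : Nat) (n : Int) : Int :=
  let s := digit_sum n
  if s ∈ MASTER_SET then s
  else if s ≤ 9 then s
  else
    match fuel with
    | 0 => s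
    | f + 1 => reduce_go f s

def reduce_number_alt (n : Int) : Int :=
  reduce_go ((digit_sum n).toNat + 1) n

-- ===== PRECONDITION & SPEC =====
def Spec_reduce_number (n : Int) (out : Int) : Prop := out = reduce_number_alt n
instance (n : Int) (out : Int) : Decidable (Spec_reduce_number n out) := by unfold Spec_reduce_number; infer_instance

-- ===== CLAIM (what is proved, stated in full; the proofs are below) =====
def Claim_equal_reduce_number : Prop := ∀ (n : Int), Dom_reduce_number n → Spec_reduce_number n (reduce_number n)

-- ===== LEMMAS AND PROOFS =====
-- The head of A (master check, then the loop) equals B's recursion, at every fuel.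
theorem loop_eq_go (f : Nat) (n : Int) :
    (let s := digit_sum n;
     if s ∈ MASTER_SET then s else reduce_loop f s) = reduce_go f n := by
  induction f generalizing n with
  | zero =>
    simp only [reduce_loop, reduce_go]
    split_ifs with h1 h2 h3 <;> omega
  | succ f ih =>
    simp only [reduce_go]
    by_cases hm : digit_sum n ∈ MASTER_SET
    · simp [hm]
    · by_cases h9 : digit_sum n ≤ 9
      · simp [h9, reduce_loop, show ¬ digit_sum n > 9 by omega]
      · simp only [hm, h9, if_false, reduce_loop,
          show digit_sum n > 9 by omega, if_true]
        exact ih (digit_sum n)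

-- ===== VERDICT (by name: the statement is the Claim_ definition above) =====
theorem reduce_number_spec : Claim_equal_reduce_number := by
  intro n _
  unfold Spec_reduce_number reduce_number reduce_number_alt
  exact loop_eq_go _ n
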